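-- pv_equiv track=rewrite | github.com/kuttelbalint/BEVADAT2022232 | HAZI/HAZI01/HAZI01.py | by_parity
-- ===== SOURCE A (Python) =====
-- def by_parity(input_list):
--     even = []
--     odd = []
--     for num in input_list:
--         if num % 2 == 0:
--             even.append(num)
--         else:
--             odd.append(num)
--     return {"even": sorted(even), "odd": sorted(odd)}
-- ===== SOURCE B (Python) =====
-- def by_parity(input_list):
--     s = sorted(input_list)
--     return {"even": [x for x in s if x % 2 == 0],
--             "odd": [x for x in s if x % 2 != 0]}
-- ===== Notes on version B (the rewrite author's own statement) =====
-- stated objective: alternative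
-- what changed: A partitions first and then sorts each group separately; B sorts the whole list once and then filters the sorted list into the even and odd groups.
import Mathlib
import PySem

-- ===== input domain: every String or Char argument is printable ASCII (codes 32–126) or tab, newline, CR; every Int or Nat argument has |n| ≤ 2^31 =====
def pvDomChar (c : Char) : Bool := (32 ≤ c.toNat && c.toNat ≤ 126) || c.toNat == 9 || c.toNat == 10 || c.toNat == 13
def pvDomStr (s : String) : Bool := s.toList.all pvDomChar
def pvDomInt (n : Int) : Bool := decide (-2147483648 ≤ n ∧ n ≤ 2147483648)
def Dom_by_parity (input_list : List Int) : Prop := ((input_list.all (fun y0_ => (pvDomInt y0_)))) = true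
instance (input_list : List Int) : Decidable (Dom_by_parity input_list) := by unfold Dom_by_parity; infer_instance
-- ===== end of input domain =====

-- B sorts the whole list once and filters the sorted list into the parity groups, instead of A's partition-then-sort-each; same return value, alternative decomposition.


-- ===== PORT A =====
-- A: loop appending each element to 'even' or 'odd', then sort each group.
def by_parity (input_list : List Int) : List (String × List Int) :=
  let acc := input_list.foldl
    (fun (st : List Int × List Int) num =>
      if PySem.Int.mod num 2 = 0 then (st.1 ++ [num], st.2) else (st.1, st.2 ++ [num]))
    ([], [])
  [("even", PySem.List.sorted acc.1 (fun x => x) false),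
   ("odd", PySem.List.sorted acc.2 (fun x => x) false)]

-- ===== PORT B =====
-- B: sort once, then filter the sorted list twice.
def by_parity_alt (input_list : List Int) : List (String × List Int) :=
  let s := PySem.List.sorted input_list (fun x => x) false
  [("even", s.filter (fun x => PySem.Int.mod x 2 = 0)),
   ("odd", s.filter (fun x => PySem.Int.mod x 2 ≠ 0))]

-- ===== PRECONDITION & SPEC =====
def Spec_by_parity (input_list : List Int) (out : List (String × List Int)) : Prop := out = by_parity_alt input_list
instance (input_list : List Int) (out : List (String × List Int)) : Decidable (Spec_by_parity input_list out) := by unfold Spec_by_parity; infer_instance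

-- ===== CLAIM (what is proved, stated in full; the proofs are below) =====
def Claim_equal_by_parity : Prop := ∀ (input_list : List Int), Dom_by_parity input_list → Spec_by_parity input_list (by_parity input_list)

-- ===== LEMMAS AND PROOFS =====

-- A's accumulating loop computes the two parity filters of the input list.
theorem by_parity_foldl_eq (xs : List Int) (e o : List Int) :
    xs.foldl (fun (st : List Int × List Int) num =>
        if PySem.Int.mod num 2 = 0 then (st.1 ++ [num], st.2) else (st.1, st.2 ++ [num])) (e, o)
      = (e ++ xs.filter (fun x => decide (PySem.Int.mod x 2 = 0)),
         o ++ xs.filter (fun x => decide (PySem.Int.mod x 2 ≠ 0))) := by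
  induction xs generalizing e o with
  | nil => simp
  | cons x t ih =>
    rw [List.foldl_cons]
    by_cases h : PySem.Int.mod x 2 = 0
    · rw [if_pos h, ih]; simp [List.filter_cons]; simp [PySem.Int.mod, Int.fmod_eq_emod] at h; omega
    · rw [if_neg h, ih]; simp [List.filter_cons]; simp [PySem.Int.mod, Int.fmod_eq_emod] at h; omega

-- sorting a filter = filtering the sorted list
theorem sorted_filter_eq (p : Int → Bool) (xs : List Int) :
    PySem.List.sorted (xs.filter p) (fun x => x) false
      = (PySem.List.sorted xs (fun x => x) false).filter p := by
  apply PySem.List.sorted_id_eq_of_perm_of_pairwise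
  · exact (PySem.List.sorted_perm xs (fun x => x) false).filter p
  · exact (PySem.List.sorted_pairwise xs (fun x => x)).sublist List.filter_sublist

-- ===== VERDICT (by name: the statement is the Claim_ definition above) =====
theorem by_parity_spec : Claim_equal_by_parity := by
  intro xs _
  show by_parity xs = by_parity_alt xs
  simp only [by_parity, by_parity_alt, by_parity_foldl_eq, List.nil_append,
    sorted_filter_eq]
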